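-- pv_equiv track=rewrite | github.com/chocowgirl/Cours-Algo-python- | LongEx/LongEx 9Apl.py | renvoie_tableau
-- ===== SOURCE A (Python) =====
-- def renvoie_tableau(lines, columns):
--     tableau = []
--     inline = []
--     insert = 1
--     for line in range(lines):
--         inline = [] #vide la liste à chaque tour de boucle
--         for icol in range(columns):
--             inline.append(insert)
--             insert = insert+1
--             # if len(inline)==columns:
--             #     tableau.append(inline)
--         tableau.append(inline)
--     return tableau
-- ===== SOURCE B (Python) =====
-- def renvoie_tableau(lines, columns):
--     if lines <= 0:
--         return []
--     flat = list(range(1, lines * columns + 1))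
--     return [flat[i * columns:(i + 1) * columns] for i in range(lines)]
-- ===== Notes on version B (the rewrite author's own statement) =====
-- stated objective: alternative
-- what changed: B builds the flat sequence 1..lines*columns once with range() and reshapes it into rows by list slicing, instead of threading a running insert counter through nested loops with repeated appends.
import Mathlib
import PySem

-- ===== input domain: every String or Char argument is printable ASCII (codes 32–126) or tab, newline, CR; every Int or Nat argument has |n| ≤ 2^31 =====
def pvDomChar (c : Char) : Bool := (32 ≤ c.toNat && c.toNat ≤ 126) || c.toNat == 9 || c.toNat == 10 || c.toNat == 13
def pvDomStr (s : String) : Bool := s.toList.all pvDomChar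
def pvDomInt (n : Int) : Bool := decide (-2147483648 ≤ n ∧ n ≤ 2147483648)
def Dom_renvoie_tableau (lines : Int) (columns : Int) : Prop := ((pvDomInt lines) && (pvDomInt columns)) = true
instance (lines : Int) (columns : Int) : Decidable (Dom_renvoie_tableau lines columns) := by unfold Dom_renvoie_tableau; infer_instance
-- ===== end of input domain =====

-- B builds the flat sequence 1..lines*columns once and reshapes it into rows by slicing,
-- instead of threading a running counter through nested appends (objective: alternative decomposition).

-- ===== PORT A =====
-- state: (tableau, insert); inline is rebuilt from [] each outer iteration, counter threads through
def renvoie_tableau (lines : Int) (columns : Int) : List (List Int) :=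
  ((PySem.List.pyRange 0 lines 1).foldl
    (fun (st : List (List Int) × Int) _ =>
      let r := (PySem.List.pyRange 0 columns 1).foldl
        (fun (s : List Int × Int) _ => (s.1 ++ [s.2], s.2 + 1)) ([], st.2)
      (st.1 ++ [r.1], r.2))
    ([], 1)).1

-- ===== PORT B =====
-- flat = list(range(1, lines*columns+1)); rows = [flat[i*columns:(i+1)*columns] for i in range(lines)]
def renvoie_tableau_alt (lines : Int) (columns : Int) : List (List Int) :=
  if lines ≤ 0 then []
  else
    let flat := PySem.List.pyRange 1 (lines * columns + 1) 1
    (PySem.List.pyRange 0 lines 1).map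
      (fun i => PySem.List.slice flat (some (i * columns)) (some ((i + 1) * columns)))

-- ===== PRECONDITION & SPEC =====
def Spec_renvoie_tableau (lines : Int) (columns : Int) (out : List (List Int)) : Prop := out = renvoie_tableau_alt lines columns
instance (lines : Int) (columns : Int) (out : List (List Int)) : Decidable (Spec_renvoie_tableau lines columns out) := by unfold Spec_renvoie_tableau; infer_instance

-- ===== CLAIM (what is proved, stated in full; the proofs are below) =====
def Claim_equal_renvoie_tableau : Prop := ∀ (lines : Int) (columns : Int), Dom_renvoie_tableau lines columns → Spec_renvoie_tableau lines columns (renvoie_tableau lines columns)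

-- ===== LEMMAS AND PROOFS =====

-- A's inner loop appends the running counter once per iteration
theorem pv_innerFold (l : List Int) (acc : List Int) (v : Int) :
    l.foldl (fun (s : List Int × Int) _ => (s.1 ++ [s.2], s.2 + 1)) (acc, v)
      = (acc ++ (List.range l.length).map (fun (j : Nat) => v + (j : Int)), v + l.length) := by
  induction l generalizing acc v with
  | nil => simp
  | cons h t ih =>
    simp only [List.foldl_cons, ih, List.length_cons, List.range_succ_eq_map,
      List.map_cons, List.map_map, Prod.mk.injEq]
    refine ⟨?_, by push_cast; ring⟩
    simp only [Nat.cast_zero, add_zero, List.append_assoc, List.singleton_append]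
    congr 2
    apply List.map_congr_left; intro j _; simp only [Function.comp]; push_cast; ring

-- A's outer loop written as nested range maps
theorem pv_outerFold (columns : Int) (l : List Int) (tab : List (List Int)) (v : Int) :
    l.foldl (fun (st : List (List Int) × Int) _ =>
      let r := (PySem.List.pyRange 0 columns 1).foldl
        (fun (s : List Int × Int) _ => (s.1 ++ [s.2], s.2 + 1)) ([], st.2)
      (st.1 ++ [r.1], r.2)) (tab, v)
    = (tab ++ (List.range l.length).map (fun (i : Nat) =>
        (List.range columns.toNat).map (fun (j : Nat) => v + ((i * columns.toNat + j : Nat) : Int))),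
       v + l.length * columns.toNat) := by
  induction l generalizing tab v with
  | nil => simp
  | cons h t ih =>
    rw [List.foldl_cons, pv_innerFold]
    simp only [List.nil_append]
    rw [ih]
    simp only [PySem.List.length_pyRange_one, Int.sub_zero, List.length_cons,
      List.range_succ_eq_map, List.map_cons, List.map_map, Prod.mk.injEq,
      List.append_assoc, List.singleton_append]
    refine ⟨?_, by push_cast; ring⟩
    congr 1
    congr 1
    · apply List.map_congr_left; intro j _; push_cast; ring
    · apply List.map_congr_left; intro i _
      simp only [Function.comp_apply]
      apply List.map_congr_left; intro j _
      push_cast; ring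

-- closed form of port A, for every input
theorem pv_A_closed (lines columns : Int) :
    renvoie_tableau lines columns
      = (List.range lines.toNat).map (fun (i : Nat) =>
          (List.range columns.toNat).map (fun (j : Nat) =>
            1 + ((i * columns.toNat + j : Nat) : Int))) := by
  unfold renvoie_tableau
  rw [pv_outerFold]
  simp [PySem.List.length_pyRange_one]

-- closed form of port B when both dimensions are positive
theorem pv_alt_closed (lines columns : Int) (hl : 0 < lines) (hc : 0 < columns) :
    renvoie_tableau_alt lines columns
      = (List.range lines.toNat).map (fun (i : Nat) =>
          (List.range columns.toNat).map (fun (j : Nat) =>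
            1 + ((i * columns.toNat + j : Nat) : Int))) := by
  unfold renvoie_tableau_alt
  rw [if_neg (by omega)]
  have hC : columns = (columns.toNat : Int) := (Int.toNat_of_nonneg hc.le).symm
  have hL : lines = (lines.toNat : Int) := (Int.toNat_of_nonneg hl.le).symm
  have hflat : lines * columns + 1 - 1 = ((lines.toNat * columns.toNat : Nat) : Int) := by
    push_cast [← hC, ← hL]; ring
  rw [PySem.List.pyRange_one 1 (lines * columns + 1), hflat,
      PySem.List.pyRange_one 0 lines, Int.sub_zero]
  rw [List.map_map]
  apply List.map_congr_left
  intro k hk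
  have hkL : k < lines.toNat := List.mem_range.mp hk
  have ha : (0 + (k : Int)) * columns = ((k * columns.toNat : Nat) : Int) := by
    push_cast [← hC]; ring
  have hb : (0 + (k : Int) + 1) * columns = (((k + 1) * columns.toNat : Nat) : Int) := by
    push_cast [← hC]; ring
  simp only [Function.comp_apply, ha, hb, PySem.List.slice_natCast, Int.toNat_natCast, ← List.map_drop, ← List.map_take]
  have hdrop : (List.range (lines.toNat * columns.toNat)).drop (k * columns.toNat)
      = List.range' (k * columns.toNat) (lines.toNat * columns.toNat - k * columns.toNat) := by
    rw [List.range_eq_range', List.drop_range']; simp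
  have htake : (k + 1) * columns.toNat - k * columns.toNat = columns.toNat := by
    simp [Nat.succ_mul]
  rw [hdrop, htake,
      List.take_range'_of_length_ge (by
        have : (k + 1) * columns.toNat ≤ lines.toNat * columns.toNat :=
          Nat.mul_le_mul_right _ hkL
        omega),
      List.range'_eq_map_range, List.map_map]
  apply List.map_congr_left; intro j _
  simp only [Function.comp_apply]

-- ===== VERDICT (by name: the statement is the Claim_ definition above) =====
theorem renvoie_tableau_spec : Claim_equal_renvoie_tableau := by
  intro lines columns _
  unfold Spec_renvoie_tableau
  by_cases hl : lines ≤ 0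
  case pos =>
    -- no rows on either side
    rw [pv_A_closed]
    unfold renvoie_tableau_alt
    rw [if_pos hl]
    simp [Int.toNat_of_nonpos hl]
  case neg =>
    have hl' : 0 < lines := by omega
    by_cases hc : columns ≤ 0
    case pos =>
      -- positive row count, empty rows: flat is empty, every slice is []
      rw [pv_A_closed]
      unfold renvoie_tableau_alt
      rw [if_neg hl]
      have hflat : PySem.List.pyRange 1 (lines * columns + 1) 1 = [] := by
        apply PySem.List.pyRange_one_eq_nil
        nlinarith
      rw [hflat, PySem.List.pyRange_one 0 lines, Int.sub_zero, List.map_map]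
      simp [Int.toNat_of_nonpos hc, PySem.List.slice, PySem.List.clampIdx, Function.comp_def, List.map_const']
    case neg =>
      have hc' : 0 < columns := by omega
      rw [pv_A_closed, pv_alt_closed lines columns hl' hc']
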